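-- pv_equiv track=rewrite | github.com/Kals-13/py2048 | 2048.py | is_shift_possible
-- ===== SOURCE A (Python) =====
-- def is_shift_possible(row):
--     for index, value in enumerate(row[:-1]):
--         if value == 0 and row[index + 1] != 0:
--             return True
--         elif value == row[index + 1] and value != 0:
--             return True
--     else:
--         return False
-- ===== SOURCE B (Python) =====
-- def is_shift_possible(row):
--     nz = []
--     seen_zero = False
--     gap = False
--     for v in row:
--         if v == 0:
--             seen_zero = True
--         else:
--             if seen_zero:
--                 gap = True
--             nz.append(v)
--     if gap:
--         return True
--     return any(a == b for a, b in zip(nz, nz[1:]))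
-- ===== Notes on version B (the rewrite author's own statement) =====
-- stated objective: alternative
-- what changed: Replaces A's indexed adjacent-pair scan over enumerate(row[:-1]) by one pass that packs nonzero tiles and flags a zero-before-nonzero gap, then checks adjacent equal pairs only in the packed list.
import Mathlib
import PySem

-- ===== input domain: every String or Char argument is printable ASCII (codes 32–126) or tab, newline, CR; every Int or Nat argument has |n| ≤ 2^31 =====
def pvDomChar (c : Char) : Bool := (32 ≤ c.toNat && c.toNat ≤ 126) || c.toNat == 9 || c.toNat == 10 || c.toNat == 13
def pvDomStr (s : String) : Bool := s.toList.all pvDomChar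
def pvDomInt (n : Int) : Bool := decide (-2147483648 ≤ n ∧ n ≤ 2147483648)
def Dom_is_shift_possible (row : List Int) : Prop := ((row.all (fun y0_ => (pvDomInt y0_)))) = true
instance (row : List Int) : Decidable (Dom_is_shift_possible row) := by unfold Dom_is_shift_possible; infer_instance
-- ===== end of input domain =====

-- B replaces A's indexed adjacent-pair scan by a pack-nonzeros pass with a gap flag plus an adjacent-equal check on the packed list (alternative decomposition, same cost).
-- ===== PORT A =====
-- A scans adjacent pairs: zero followed by nonzero, or equal nonzero neighbours.
def is_shift_possible (row : List Int) : Bool :=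
  match row with
  | a :: b :: rest =>
      if a = 0 && b != 0 then true
      else if a = b && a != 0 then true
      else is_shift_possible (b :: rest)
  | _ => false

-- ===== PORT B =====
-- any(a == b for a, b in zip(nz, nz[1:]))
def pvAnyAdjEq (l : List Int) : Bool :=
  (l.zip (l.drop 1)).any (fun p => p.1 == p.2)

def is_shift_possible_alt (row : List Int) : Bool :=
  let st := row.foldl
    (fun (s : List Int × Bool × Bool) v =>
      if v = 0 then (s.1, true, s.2.2)
      else (s.1 ++ [v], s.2.1, if s.2.1 then true else s.2.2))
    ([], false, false)
  if st.2.2 then true else pvAnyAdjEq st.1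

-- ===== PRECONDITION & SPEC =====
def Spec_is_shift_possible (row : List Int) (out : Bool) : Prop := out = is_shift_possible_alt row
instance (row : List Int) (out : Bool) : Decidable (Spec_is_shift_possible row out) := by unfold Spec_is_shift_possible; infer_instance

-- ===== CLAIM (what is proved, stated in full; the proofs are below) =====
def Claim_equal_is_shift_possible : Prop := ∀ (row : List Int), Dom_is_shift_possible row → Spec_is_shift_possible row (is_shift_possible row)

-- ===== LEMMAS AND PROOFS =====
def pvNz (l : List Int) : List Int := l.filter (fun v => v != 0)

def pvHz (l : List Int) : Bool := l.any (fun v => v == 0)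

theorem pvAnyAdjEq_nil : pvAnyAdjEq [] = false := rfl
theorem pvAnyAdjEq_single (a : Int) : pvAnyAdjEq [a] = false := rfl
theorem pvAnyAdjEq_cons₂ (a b : Int) (t : List Int) :
    pvAnyAdjEq (a :: b :: t) = ((a == b) || pvAnyAdjEq (b :: t)) := by
  simp [pvAnyAdjEq]

def pvGap (l : List Int) : Bool :=
  match l with
  | [] => false
  | v :: t => if v = 0 then !(pvNz t).isEmpty || pvGap t else pvGap t

theorem pvFoldl_inv (l : List Int) (acc : List Int) (sz gap : Bool) :
    l.foldl
      (fun (s : List Int × Bool × Bool) v =>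
        if v = 0 then (s.1, true, s.2.2)
        else (s.1 ++ [v], s.2.1, if s.2.1 then true else s.2.2))
      (acc, sz, gap)
    = (acc ++ pvNz l, sz || pvHz l, gap || (sz && !(pvNz l).isEmpty) || pvGap l) := by
  induction l generalizing acc sz gap with
  | nil => simp [pvNz, pvHz, pvGap]
  | cons v t ih =>
    by_cases hv : v = 0
    · subst hv
      simp only [List.foldl_cons, ih]
      simp [pvNz, pvHz, pvGap]
      cases sz <;> cases gap <;> cases pvGap t <;> cases (pvNz t).isEmpty <;> simp
    · simp only [List.foldl_cons, if_neg hv, ih]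
      have : pvNz (v :: t) = v :: pvNz t := by simp [pvNz, hv]
      simp [this, pvHz, pvGap, hv]
      cases sz <;> cases gap <;> cases pvGap t <;> simp [hv]

theorem pvAlt_eq (row : List Int) :
    is_shift_possible_alt row = (pvGap row || pvAnyAdjEq (pvNz row)) := by
  simp only [is_shift_possible_alt, pvFoldl_inv]
  simp

theorem pvA_eq (row : List Int) :
    is_shift_possible row = (pvGap row || pvAnyAdjEq (pvNz row)) := by
  match row with
  | [] => simp [is_shift_possible, pvGap, pvNz, pvAnyAdjEq_nil]
  | [a] =>
    by_cases ha : a = 0 <;>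
      simp [is_shift_possible, pvGap, pvNz, pvAnyAdjEq_nil, pvAnyAdjEq_single, ha]
  | a :: b :: t =>
    have ih := pvA_eq (b :: t)
    by_cases ha : a = 0
    · subst ha
      by_cases hb : b = 0
      · subst hb
        rw [show is_shift_possible (0 :: 0 :: t) = is_shift_possible (0 :: t) by
          simp [is_shift_possible]]
        rw [ih]
        simp [pvGap, pvNz]
      · simp [is_shift_possible, pvGap, pvNz, hb]
    · by_cases hab : a = b
      · subst hab
        simp [is_shift_possible, ha, pvGap, pvNz, pvAnyAdjEq_cons₂]
      · rw [show is_shift_possible (a :: b :: t) = is_shift_possible (b :: t) by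
          simp [is_shift_possible, ha, hab]]
        rw [ih]
        have hg : pvGap (a :: b :: t) = pvGap (b :: t) := by simp [pvGap, ha]
        have hn : pvNz (a :: b :: t) = a :: pvNz (b :: t) := by simp [pvNz, ha]
        rw [hg, hn]
        by_cases hb : b = 0
        · subst hb
          have hn2 : pvNz (0 :: t) = pvNz t := by simp [pvNz]
          have hg2 : pvGap (0 :: t) = (!(pvNz t).isEmpty || pvGap t) := by simp [pvGap]
          rw [hn2, hg2]
          cases h : pvNz t with
          | nil => simp [pvAnyAdjEq_nil, pvAnyAdjEq_single]
          | cons c r => simp [pvAnyAdjEq_cons₂]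
        · have hn2 : pvNz (b :: t) = b :: pvNz t := by simp [pvNz, hb]
          rw [hn2]
          have hne : (a == b) = false := by simp [hab]
          simp [pvAnyAdjEq_cons₂, hne]

-- ===== VERDICT (by name: the statement is the Claim_ definition above) =====
theorem is_shift_possible_spec : Claim_equal_is_shift_possible := by
  intro row _
  unfold Spec_is_shift_possible
  rw [pvA_eq, pvAlt_eq]
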